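-- pv_equiv track=rewrite | github.com/joshuaazev/HandGestureRecognition | final_project.py | define_fingers_raised
-- ===== SOURCE A (Python) =====
-- def define_fingers_raised(orientation, thumb_detection, list_peaks, list_s_peaks):
--     len_peaks = len(list_peaks)
--     len_s_peaks =  len(list_s_peaks)
--     string = 'Orientation is: '+ orientation + '\nThumb position: '+  thumb_detection + '\n'
--     if orientation == 'vertical' or orientation == 'horizontal':
--         if thumb_detection == 'no thumb':
--             for i in range(len_peaks):
--                 if list_peaks[i] in list_s_peaks and i == 0:
--                     string += 'Index Finger is raised\n'
--                 elif list_peaks[i] in list_s_peaks and i == 1: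
--                     string += 'Middle Finger is raised\n'
--                 elif list_peaks[i] in list_s_peaks and i == 2:
--                     string +='Ring Finger is raised\n'
--                 elif list_peaks[i] in list_s_peaks and i == 3:
--                     string += 'Pinkie is raised\n'
--         elif thumb_detection == 'right':
--             for i in range(len_peaks):
--                 if list_peaks[i] in list_s_peaks and i == 3:
--                     string += 'Index Finger is raised\n'
--                 elif list_peaks[i] in list_s_peaks and i == 2:
--                     string += 'Middle Finger is raised\n'
--                 elif list_peaks[i] in list_s_peaks and i == 1:
--                     string +='Ring Finger is raised\n'
--                 elif list_peaks[i] in list_s_peaks and i == 0: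
--                     string += 'Pinkie is raised\n'
--         elif thumb_detection == 'left':
--             for i in range(len_peaks):
--                 if list_peaks[i] in list_s_peaks and i == 1:
--                     string += 'Index Finger is raised\n'
--                 elif list_peaks[i] in list_s_peaks and i == 2:
--                     string += 'Middle Finger is raised\n'
--                 elif list_peaks[i] in list_s_peaks and i == 3:
--                     string +='Ring Finger is raised\n'
--                 elif list_peaks[i] in list_s_peaks and i == 4:
--                     string += 'Pinkie is raised\n'
--     return string
-- ===== SOURCE B (Python) =====
-- # B: instead of scanning all of list_peaks, gather per FINGER: for each of the four
-- # fingers look up its slot, test that single peak, collect hits, sort by slot to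
-- # restore A's ascending-index output order.
-- _FINGER_SLOTS = {
--     'no thumb': [('Index Finger', 0), ('Middle Finger', 1), ('Ring Finger', 2), ('Pinkie', 3)],
--     'right':    [('Index Finger', 3), ('Middle Finger', 2), ('Ring Finger', 1), ('Pinkie', 0)],
--     'left':     [('Index Finger', 1), ('Middle Finger', 2), ('Ring Finger', 3), ('Pinkie', 4)],
-- }
--
-- def define_fingers_raised(orientation, thumb_detection, list_peaks, list_s_peaks):
--     string = 'Orientation is: ' + orientation + '\nThumb position: ' + thumb_detection + '\n'
--     if orientation in ('vertical', 'horizontal'):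
--         s_set = set(list_s_peaks)
--         hits = [(slot, name)
--                 for name, slot in _FINGER_SLOTS.get(thumb_detection, [])
--                 if slot < len(list_peaks) and list_peaks[slot] in s_set]
--         hits.sort(key=lambda t: t[0])
--         for _, name in hits:
--             string += name + ' is raised\n'
--     return string
-- ===== Notes on version B (the rewrite author's own statement) =====
-- stated objective: alternative
-- what changed: Instead of A's three branch-specific loops over every index of list_peaks, B iterates over the four FINGERS, probes only each finger's assigned slot of list_peaks, collects the (slot, name) hits and sorts them by slot to restore A's ascending-index output order.
import Mathlib
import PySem

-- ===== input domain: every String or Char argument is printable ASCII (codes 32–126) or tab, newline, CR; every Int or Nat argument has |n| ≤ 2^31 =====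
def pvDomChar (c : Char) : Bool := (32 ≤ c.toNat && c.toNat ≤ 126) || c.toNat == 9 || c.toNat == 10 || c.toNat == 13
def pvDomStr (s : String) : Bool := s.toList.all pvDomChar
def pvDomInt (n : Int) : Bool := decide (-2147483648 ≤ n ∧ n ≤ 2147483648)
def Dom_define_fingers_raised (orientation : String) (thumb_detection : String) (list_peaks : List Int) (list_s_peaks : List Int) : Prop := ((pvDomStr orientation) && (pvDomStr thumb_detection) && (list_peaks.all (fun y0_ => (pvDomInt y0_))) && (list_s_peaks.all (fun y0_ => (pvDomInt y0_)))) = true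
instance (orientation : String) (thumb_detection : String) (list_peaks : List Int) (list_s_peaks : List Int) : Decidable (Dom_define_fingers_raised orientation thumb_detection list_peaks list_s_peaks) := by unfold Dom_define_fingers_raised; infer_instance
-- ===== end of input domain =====

-- B gathers per FINGER: it probes only each finger's assigned slot of list_peaks,
-- collects the (slot, name) hits and sorts them by slot — instead of A's three
-- branch-specific loops over every index of list_peaks; objective: alternative.

-- ===== PORT A =====
-- indices produced by range(len(list_peaks)) are always in range, so pyGetD is exact here
def define_fingers_raised (orientation : String) (thumb_detection : String) (list_peaks : List Int) (list_s_peaks : List Int) : String :=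
  let len_peaks : Int := (list_peaks.length : Int)
  let string : String := "Orientation is: " ++ orientation ++ "\nThumb position: " ++ thumb_detection ++ "\n"
  if orientation == "vertical" || orientation == "horizontal" then
    if thumb_detection == "no thumb" then
      (PySem.List.pyRange 0 len_peaks 1).foldl (fun s i =>
        if PySem.List.pyGetD list_peaks i 0 ∈ list_s_peaks ∧ i = 0 then s ++ "Index Finger is raised\n"
        else if PySem.List.pyGetD list_peaks i 0 ∈ list_s_peaks ∧ i = 1 then s ++ "Middle Finger is raised\n"
        else if PySem.List.pyGetD list_peaks i 0 ∈ list_s_peaks ∧ i = 2 then s ++ "Ring Finger is raised\n"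
        else if PySem.List.pyGetD list_peaks i 0 ∈ list_s_peaks ∧ i = 3 then s ++ "Pinkie is raised\n"
        else s) string
    else if thumb_detection == "right" then
      (PySem.List.pyRange 0 len_peaks 1).foldl (fun s i =>
        if PySem.List.pyGetD list_peaks i 0 ∈ list_s_peaks ∧ i = 3 then s ++ "Index Finger is raised\n"
        else if PySem.List.pyGetD list_peaks i 0 ∈ list_s_peaks ∧ i = 2 then s ++ "Middle Finger is raised\n"
        else if PySem.List.pyGetD list_peaks i 0 ∈ list_s_peaks ∧ i = 1 then s ++ "Ring Finger is raised\n"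
        else if PySem.List.pyGetD list_peaks i 0 ∈ list_s_peaks ∧ i = 0 then s ++ "Pinkie is raised\n"
        else s) string
    else if thumb_detection == "left" then
      (PySem.List.pyRange 0 len_peaks 1).foldl (fun s i =>
        if PySem.List.pyGetD list_peaks i 0 ∈ list_s_peaks ∧ i = 1 then s ++ "Index Finger is raised\n"
        else if PySem.List.pyGetD list_peaks i 0 ∈ list_s_peaks ∧ i = 2 then s ++ "Middle Finger is raised\n"
        else if PySem.List.pyGetD list_peaks i 0 ∈ list_s_peaks ∧ i = 3 then s ++ "Ring Finger is raised\n"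
        else if PySem.List.pyGetD list_peaks i 0 ∈ list_s_peaks ∧ i = 4 then s ++ "Pinkie is raised\n"
        else s) string
    else string
  else string

-- ===== PORT B =====
-- the module constant _FINGER_SLOTS, read through .get(thumb_detection, [])
def pvFingerSlots (t : String) : List (String × Int) :=
  if t == "no thumb" then [("Index Finger", 0), ("Middle Finger", 1), ("Ring Finger", 2), ("Pinkie", 3)]
  else if t == "right" then [("Index Finger", 3), ("Middle Finger", 2), ("Ring Finger", 1), ("Pinkie", 0)]
  else if t == "left" then [("Index Finger", 1), ("Middle Finger", 2), ("Ring Finger", 3), ("Pinkie", 4)]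
  else []

def define_fingers_raised_alt (orientation : String) (thumb_detection : String) (list_peaks : List Int) (list_s_peaks : List Int) : String :=
  let string : String := "Orientation is: " ++ orientation ++ "\nThumb position: " ++ thumb_detection ++ "\n"
  if orientation == "vertical" || orientation == "horizontal" then
    let sset : PySem.Set Int := PySem.Set.ofList list_s_peaks
    let hits : List (Int × String) := (pvFingerSlots thumb_detection).filterMap (fun ns =>
      if ns.2 < (list_peaks.length : Int) ∧ PySem.Set.contains sset (PySem.List.pyGetD list_peaks ns.2 0)
      then some (ns.2, ns.1) else none)
    (PySem.List.sorted hits (fun t => t.1)).foldl (fun s p => s ++ p.2 ++ " is raised\n") string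
  else string

-- ===== PRECONDITION & SPEC =====
def Spec_define_fingers_raised (orientation : String) (thumb_detection : String) (list_peaks : List Int) (list_s_peaks : List Int) (out : String) : Prop := out = define_fingers_raised_alt orientation thumb_detection list_peaks list_s_peaks
instance (orientation : String) (thumb_detection : String) (list_peaks : List Int) (list_s_peaks : List Int) (out : String) : Decidable (Spec_define_fingers_raised orientation thumb_detection list_peaks list_s_peaks out) := by unfold Spec_define_fingers_raised; infer_instance

-- ===== CLAIM =====
def Claim_equal_define_fingers_raised : Prop := ∀ (orientation : String) (thumb_detection : String) (list_peaks : List Int) (list_s_peaks : List Int), Dom_define_fingers_raised orientation thumb_detection list_peaks list_s_peaks → Spec_define_fingers_raised orientation thumb_detection list_peaks list_s_peaks (define_fingers_raised orientation thumb_detection list_peaks list_s_peaks)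

-- ===== LEMMAS AND PROOFS =====

-- accumulator shift for a foldl of string appends
theorem pv_strfoldl_shift (L : List String) (v : String) :
    List.foldl (· ++ ·) v L = v ++ List.foldl (· ++ ·) "" L := by
  induction L generalizing v with
  | nil => simp
  | cons a L ih =>
    simp only [List.foldl_cons]
    rw [ih (v ++ a), ih ("" ++ a)]
    simp [String.append_assoc]

-- a foldl that appends f x per element is init ++ join of the mapped lines
theorem pv_strfoldl_append {α : Type} (f : α → String) (l : List α) (init : String) :
    l.foldl (fun s x => s ++ f x) init = init ++ String.join (l.map f) := by
  induction l generalizing init with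
  | nil => simp [String.join]
  | cons x xs ih =>
    simp only [List.foldl_cons, List.map_cons, ih]
    rw [String.join, String.join, List.foldl_cons,
      pv_strfoldl_shift (xs.map f) ("" ++ f x)]
    simp [String.append_assoc]

theorem pv_join_empty {α : Type} (f : α → String) (l : List α) (h : ∀ x ∈ l, f x = "") :
    String.join (l.map f) = "" := by
  induction l with
  | nil => simp [String.join]
  | cons x xs ih =>
    rw [List.map_cons, String.join, List.foldl_cons, h x (by simp)]
    exact ih (fun y hy => h y (by simp [hy]))

theorem pv_join_append (a b : List String) :
    String.join (a ++ b) = String.join a ++ String.join b := by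
  rw [String.join, String.join, String.join, List.foldl_append,
    pv_strfoldl_shift b (List.foldl (· ++ ·) "" a)]

-- a line function vanishing from index 5 on: the join over range(n) is the five gated lines
theorem pv_join_range5 (f : Int → String) (n : Int) (hn : 0 ≤ n) (h : ∀ i, 5 ≤ i → f i = "") :
    String.join ((PySem.List.pyRange 0 n 1).map f) =
      (if 0 < n then f 0 else "") ++ (if 1 < n then f 1 else "") ++ (if 2 < n then f 2 else "")
        ++ (if 3 < n then f 3 else "") ++ (if 4 < n then f 4 else "") := by
  rcases lt_or_ge n 5 with h5 | h5
  · have hc : n = 0 ∨ n = 1 ∨ n = 2 ∨ n = 3 ∨ n = 4 := by omega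
    rcases hc with rfl | rfl | rfl | rfl | rfl
    · rw [show PySem.List.pyRange 0 0 1 = ([] : List Int) from by decide]; simp [String.join]
    · rw [show PySem.List.pyRange 0 1 1 = [0] from by decide]; simp [String.join]
    · rw [show PySem.List.pyRange 0 2 1 = [0, 1] from by decide]; simp [String.join]
    · rw [show PySem.List.pyRange 0 3 1 = [0, 1, 2] from by decide]; simp [String.join]
    · rw [show PySem.List.pyRange 0 4 1 = [0, 1, 2, 3] from by decide]; simp [String.join]
  · rw [PySem.List.pyRange_one_append 0 5 n (by omega) (by omega), List.map_append, pv_join_append,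
      pv_join_empty f _ (fun x hx => h x (PySem.List.mem_pyRange_one.mp hx).1),
      show PySem.List.pyRange 0 5 1 = [0, 1, 2, 3, 4] from by decide]
    simp only [List.map_cons, List.map_nil, String.join, List.foldl_cons, List.foldl_nil]
    rw [if_pos (by omega), if_pos (by omega), if_pos (by omega), if_pos (by omega), if_pos (by omega)]
    simp

theorem pv_set_contains (ls : List Int) (p : Int) :
    PySem.Set.contains (PySem.Set.ofList ls) p = decide (p ∈ ls) := by
  simp [PySem.Set.contains, PySem.Set.mem_ofList]

-- folding string appends over a filterMap = folding the optional line over the source list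
theorem pv_foldl_filterMap {α β : Type} (f : α → Option β) (g : β → String) (l : List α) (init : String) :
    (l.filterMap f).foldl (fun s p => s ++ g p) init
      = l.foldl (fun s x => s ++ ((f x).elim "" g)) init := by
  induction l generalizing init with
  | nil => simp
  | cons x xs ih =>
    cases h : f x with
    | none => simp [h, ih]
    | some y => simp [h, ih]

theorem pv_elim_ite (P : Prop) [Decidable P] {β : Type} (u : β) (g : β → String) :
    (if P then some u else none).elim "" g = if P then g u else "" := by
  split_ifs <;> rfl

theorem pv_gate (P Q : Prop) [Decidable P] [Decidable Q] (l : String) :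
    (if P then (if Q then l else "") else "") = (if P ∧ Q then l else "") := by
  split_ifs <;> tauto

-- the line A's loop body appends at index i, per thumb branch
def pvLineNT (lp ls : List Int) (i : Int) : String :=
  if PySem.List.pyGetD lp i 0 ∈ ls ∧ i = 0 then "Index Finger is raised\n"
  else if PySem.List.pyGetD lp i 0 ∈ ls ∧ i = 1 then "Middle Finger is raised\n"
  else if PySem.List.pyGetD lp i 0 ∈ ls ∧ i = 2 then "Ring Finger is raised\n"
  else if PySem.List.pyGetD lp i 0 ∈ ls ∧ i = 3 then "Pinkie is raised\n"
  else ""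

def pvLineR (lp ls : List Int) (i : Int) : String :=
  if PySem.List.pyGetD lp i 0 ∈ ls ∧ i = 3 then "Index Finger is raised\n"
  else if PySem.List.pyGetD lp i 0 ∈ ls ∧ i = 2 then "Middle Finger is raised\n"
  else if PySem.List.pyGetD lp i 0 ∈ ls ∧ i = 1 then "Ring Finger is raised\n"
  else if PySem.List.pyGetD lp i 0 ∈ ls ∧ i = 0 then "Pinkie is raised\n"
  else ""

def pvLineL (lp ls : List Int) (i : Int) : String :=
  if PySem.List.pyGetD lp i 0 ∈ ls ∧ i = 1 then "Index Finger is raised\n"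
  else if PySem.List.pyGetD lp i 0 ∈ ls ∧ i = 2 then "Middle Finger is raised\n"
  else if PySem.List.pyGetD lp i 0 ∈ ls ∧ i = 3 then "Ring Finger is raised\n"
  else if PySem.List.pyGetD lp i 0 ∈ ls ∧ i = 4 then "Pinkie is raised\n"
  else ""

theorem branchNT (lp ls : List Int) (header : String) :
    (PySem.List.pyRange 0 (lp.length : Int) 1).foldl (fun s i =>
        if PySem.List.pyGetD lp i 0 ∈ ls ∧ i = 0 then s ++ "Index Finger is raised\n"
        else if PySem.List.pyGetD lp i 0 ∈ ls ∧ i = 1 then s ++ "Middle Finger is raised\n"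
        else if PySem.List.pyGetD lp i 0 ∈ ls ∧ i = 2 then s ++ "Ring Finger is raised\n"
        else if PySem.List.pyGetD lp i 0 ∈ ls ∧ i = 3 then s ++ "Pinkie is raised\n"
        else s) header
    = (PySem.List.sorted ((pvFingerSlots "no thumb").filterMap (fun ns =>
        if ns.2 < (lp.length : Int) ∧ PySem.Set.contains (PySem.Set.ofList ls) (PySem.List.pyGetD lp ns.2 0)
        then some (ns.2, ns.1) else none)) (fun t => t.1)).foldl
        (fun s p => s ++ p.2 ++ " is raised\n") header := by
  have hstep : (fun (s : String) (i : Int) =>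
        if PySem.List.pyGetD lp i 0 ∈ ls ∧ i = 0 then s ++ "Index Finger is raised\n"
        else if PySem.List.pyGetD lp i 0 ∈ ls ∧ i = 1 then s ++ "Middle Finger is raised\n"
        else if PySem.List.pyGetD lp i 0 ∈ ls ∧ i = 2 then s ++ "Ring Finger is raised\n"
        else if PySem.List.pyGetD lp i 0 ∈ ls ∧ i = 3 then s ++ "Pinkie is raised\n"
        else s) = fun s i => s ++ pvLineNT lp ls i := by
    funext s i; simp only [pvLineNT]; split_ifs <;> simp
  have hvan : ∀ i : Int, 5 ≤ i → pvLineNT lp ls i = "" := by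
    intro i hi
    have h0 : ¬(i = 0) := by omega
    have h1 : ¬(i = 1) := by omega
    have h2 : ¬(i = 2) := by omega
    have h3 : ¬(i = 3) := by omega
    simp [pvLineNT, h0, h1, h2, h3]
  rw [hstep, pv_strfoldl_append, pv_join_range5 _ _ (Int.natCast_nonneg _) hvan]
  have hfs : pvFingerSlots "no thumb"
      = [("Index Finger", 0), ("Middle Finger", 1), ("Ring Finger", 2), ("Pinkie", 3)] := rfl
  rw [hfs]
  have hg : (fun (s : String) (p : Int × String) => s ++ p.2 ++ " is raised\n")
      = fun s p => s ++ (p.2 ++ " is raised\n") := by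
    funext s p; rw [String.append_assoc]
  set f : String × Int → Option (Int × String) := fun ns =>
      if ns.2 < (lp.length : Int) ∧ PySem.Set.contains (PySem.Set.ofList ls) (PySem.List.pyGetD lp ns.2 0)
      then some (ns.2, ns.1) else none with hf
  have hpw : (([("Index Finger", 0), ("Middle Finger", 1), ("Ring Finger", 2), ("Pinkie", 3)] : List (String × Int)).filterMap f).Pairwise
      (fun p q : Int × String => p.1 < q.1) := by
    refine List.Pairwise.filterMap f (R := fun a b : String × Int => a.2 < b.2) ?_ (by decide)
    intro a a' hab b hb b' hb'
    simp only [hf] at hb hb'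
    split at hb
    · injection hb with hb; subst hb
      split at hb'
      · injection hb' with hb'; subst hb'; simpa using hab
      · cases hb'
    · cases hb
  have hsort := PySem.List.sorted_eq_of_perm_of_pairwise_lt _ _ (fun t : Int × String => t.1)
    (List.Perm.refl (([("Index Finger", 0), ("Middle Finger", 1), ("Ring Finger", 2), ("Pinkie", 3)] : List (String × Int)).filterMap f)) hpw
  rw [hsort, hg, pv_foldl_filterMap]
  simp only [List.foldl_cons, List.foldl_nil, hf, pv_set_contains]
  simp [pvLineNT, pv_gate, pv_elim_ite, String.append_assoc, decide_eq_true_eq]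

theorem branchR (lp ls : List Int) (header : String) :
    (PySem.List.pyRange 0 (lp.length : Int) 1).foldl (fun s i =>
        if PySem.List.pyGetD lp i 0 ∈ ls ∧ i = 3 then s ++ "Index Finger is raised\n"
        else if PySem.List.pyGetD lp i 0 ∈ ls ∧ i = 2 then s ++ "Middle Finger is raised\n"
        else if PySem.List.pyGetD lp i 0 ∈ ls ∧ i = 1 then s ++ "Ring Finger is raised\n"
        else if PySem.List.pyGetD lp i 0 ∈ ls ∧ i = 0 then s ++ "Pinkie is raised\n"
        else s) header
    = (PySem.List.sorted ((pvFingerSlots "right").filterMap (fun ns =>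
        if ns.2 < (lp.length : Int) ∧ PySem.Set.contains (PySem.Set.ofList ls) (PySem.List.pyGetD lp ns.2 0)
        then some (ns.2, ns.1) else none)) (fun t => t.1)).foldl
        (fun s p => s ++ p.2 ++ " is raised\n") header := by
  have hstep : (fun (s : String) (i : Int) =>
        if PySem.List.pyGetD lp i 0 ∈ ls ∧ i = 3 then s ++ "Index Finger is raised\n"
        else if PySem.List.pyGetD lp i 0 ∈ ls ∧ i = 2 then s ++ "Middle Finger is raised\n"
        else if PySem.List.pyGetD lp i 0 ∈ ls ∧ i = 1 then s ++ "Ring Finger is raised\n"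
        else if PySem.List.pyGetD lp i 0 ∈ ls ∧ i = 0 then s ++ "Pinkie is raised\n"
        else s) = fun s i => s ++ pvLineR lp ls i := by
    funext s i; simp only [pvLineR]; split_ifs <;> simp
  have hvan : ∀ i : Int, 5 ≤ i → pvLineR lp ls i = "" := by
    intro i hi
    have h0 : ¬(i = 0) := by omega
    have h1 : ¬(i = 1) := by omega
    have h2 : ¬(i = 2) := by omega
    have h3 : ¬(i = 3) := by omega
    simp [pvLineR, h0, h1, h2, h3]
  rw [hstep, pv_strfoldl_append, pv_join_range5 _ _ (Int.natCast_nonneg _) hvan]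
  have hfs : pvFingerSlots "right"
      = [("Index Finger", 3), ("Middle Finger", 2), ("Ring Finger", 1), ("Pinkie", 0)] := rfl
  rw [hfs]
  have hg : (fun (s : String) (p : Int × String) => s ++ p.2 ++ " is raised\n")
      = fun s p => s ++ (p.2 ++ " is raised\n") := by
    funext s p; rw [String.append_assoc]
  set f : String × Int → Option (Int × String) := fun ns =>
      if ns.2 < (lp.length : Int) ∧ PySem.Set.contains (PySem.Set.ofList ls) (PySem.List.pyGetD lp ns.2 0)
      then some (ns.2, ns.1) else none with hf
  have hpw : (([("Pinkie", 0), ("Ring Finger", 1), ("Middle Finger", 2), ("Index Finger", 3)] : List (String × Int)).filterMap f).Pairwise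
      (fun p q : Int × String => p.1 < q.1) := by
    refine List.Pairwise.filterMap f (R := fun a b : String × Int => a.2 < b.2) ?_ (by decide)
    intro a a' hab b hb b' hb'
    simp only [hf] at hb hb'
    split at hb
    · injection hb with hb; subst hb
      split at hb'
      · injection hb' with hb'; subst hb'; simpa using hab
      · cases hb'
    · cases hb
  have hperm : (([("Pinkie", 0), ("Ring Finger", 1), ("Middle Finger", 2), ("Index Finger", 3)] : List (String × Int)).filterMap f).Perm
      (([("Index Finger", 3), ("Middle Finger", 2), ("Ring Finger", 1), ("Pinkie", 0)] : List (String × Int)).filterMap f) :=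
    List.Perm.filterMap f (by decide)
  have hsort := PySem.List.sorted_eq_of_perm_of_pairwise_lt _ _ (fun t : Int × String => t.1) hperm hpw
  rw [hsort, hg, pv_foldl_filterMap]
  simp only [List.foldl_cons, List.foldl_nil, hf, pv_set_contains]
  simp [pvLineR, pv_gate, pv_elim_ite, String.append_assoc, decide_eq_true_eq]

theorem branchL (lp ls : List Int) (header : String) :
    (PySem.List.pyRange 0 (lp.length : Int) 1).foldl (fun s i =>
        if PySem.List.pyGetD lp i 0 ∈ ls ∧ i = 1 then s ++ "Index Finger is raised\n"
        else if PySem.List.pyGetD lp i 0 ∈ ls ∧ i = 2 then s ++ "Middle Finger is raised\n"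
        else if PySem.List.pyGetD lp i 0 ∈ ls ∧ i = 3 then s ++ "Ring Finger is raised\n"
        else if PySem.List.pyGetD lp i 0 ∈ ls ∧ i = 4 then s ++ "Pinkie is raised\n"
        else s) header
    = (PySem.List.sorted ((pvFingerSlots "left").filterMap (fun ns =>
        if ns.2 < (lp.length : Int) ∧ PySem.Set.contains (PySem.Set.ofList ls) (PySem.List.pyGetD lp ns.2 0)
        then some (ns.2, ns.1) else none)) (fun t => t.1)).foldl
        (fun s p => s ++ p.2 ++ " is raised\n") header := by
  have hstep : (fun (s : String) (i : Int) =>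
        if PySem.List.pyGetD lp i 0 ∈ ls ∧ i = 1 then s ++ "Index Finger is raised\n"
        else if PySem.List.pyGetD lp i 0 ∈ ls ∧ i = 2 then s ++ "Middle Finger is raised\n"
        else if PySem.List.pyGetD lp i 0 ∈ ls ∧ i = 3 then s ++ "Ring Finger is raised\n"
        else if PySem.List.pyGetD lp i 0 ∈ ls ∧ i = 4 then s ++ "Pinkie is raised\n"
        else s) = fun s i => s ++ pvLineL lp ls i := by
    funext s i; simp only [pvLineL]; split_ifs <;> simp
  have hvan : ∀ i : Int, 5 ≤ i → pvLineL lp ls i = "" := by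
    intro i hi
    have h1 : ¬(i = 1) := by omega
    have h2 : ¬(i = 2) := by omega
    have h3 : ¬(i = 3) := by omega
    have h4 : ¬(i = 4) := by omega
    simp [pvLineL, h1, h2, h3, h4]
  rw [hstep, pv_strfoldl_append, pv_join_range5 _ _ (Int.natCast_nonneg _) hvan]
  have hfs : pvFingerSlots "left"
      = [("Index Finger", 1), ("Middle Finger", 2), ("Ring Finger", 3), ("Pinkie", 4)] := rfl
  rw [hfs]
  have hg : (fun (s : String) (p : Int × String) => s ++ p.2 ++ " is raised\n")
      = fun s p => s ++ (p.2 ++ " is raised\n") := by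
    funext s p; rw [String.append_assoc]
  set f : String × Int → Option (Int × String) := fun ns =>
      if ns.2 < (lp.length : Int) ∧ PySem.Set.contains (PySem.Set.ofList ls) (PySem.List.pyGetD lp ns.2 0)
      then some (ns.2, ns.1) else none with hf
  have hpw : (([("Index Finger", 1), ("Middle Finger", 2), ("Ring Finger", 3), ("Pinkie", 4)] : List (String × Int)).filterMap f).Pairwise
      (fun p q : Int × String => p.1 < q.1) := by
    refine List.Pairwise.filterMap f (R := fun a b : String × Int => a.2 < b.2) ?_ (by decide)
    intro a a' hab b hb b' hb'
    simp only [hf] at hb hb'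
    split at hb
    · injection hb with hb; subst hb
      split at hb'
      · injection hb' with hb'; subst hb'; simpa using hab
      · cases hb'
    · cases hb
  have hsort := PySem.List.sorted_eq_of_perm_of_pairwise_lt _ _ (fun t : Int × String => t.1)
    (List.Perm.refl (([("Index Finger", 1), ("Middle Finger", 2), ("Ring Finger", 3), ("Pinkie", 4)] : List (String × Int)).filterMap f)) hpw
  rw [hsort, hg, pv_foldl_filterMap]
  simp only [List.foldl_cons, List.foldl_nil, hf, pv_set_contains]
  simp [pvLineL, pv_gate, pv_elim_ite, String.append_assoc, decide_eq_true_eq]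

-- ===== VERDICT =====
theorem define_fingers_raised_spec : Claim_equal_define_fingers_raised := by
  intro orientation thumb_detection list_peaks list_s_peaks _
  unfold Spec_define_fingers_raised define_fingers_raised define_fingers_raised_alt
  by_cases ho : (orientation == "vertical" || orientation == "horizontal") = true
  · simp only [ho, if_pos]
    by_cases h1 : thumb_detection = "no thumb"
    · subst h1
      simp only [beq_self_eq_true, if_pos]
      exact branchNT list_peaks list_s_peaks _
    · by_cases h2 : thumb_detection = "right"
      · subst h2
        simp only [show (("right" : String) == "no thumb") = false from by decide,
          Bool.false_eq_true, if_false]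
        exact branchR list_peaks list_s_peaks _
      · by_cases h3 : thumb_detection = "left"
        · subst h3
          simp only [show (("left" : String) == "no thumb") = false from by decide,
            show (("left" : String) == "right") = false from by decide,
            Bool.false_eq_true, if_false]
          exact branchL list_peaks list_s_peaks _
        · have g1 : (thumb_detection == "no thumb") = false := by simp [h1]
          have g2 : (thumb_detection == "right") = false := by simp [h2]
          have g3 : (thumb_detection == "left") = false := by simp [h3]
          have hfs : pvFingerSlots thumb_detection = [] := by
            simp [pvFingerSlots, g1, g2, g3]
          simp [g1, g2, g3, hfs, PySem.List.sorted]
  · simp [ho]
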